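-- pv_equiv track=rewrite | github.com/sa111nt/Practice-of-task-scheduling | Assignment1/algorithm.py | calculate_tardy_jobs
-- ===== SOURCE A (Python) =====
-- def calculate_tardy_jobs(sequence, p, d, S):
--     """
--     Oblicza liczbę spóźnionych zadań dla danej sekwencji
--     sequence: lista numerów zadań (numeracja od 1)
--     """
--     n = len(sequence)
--     current_time = 0
--     tardy_count = 0
--
--     for i in range(n):
--         job = sequence[i] - 1  # Przelicz na indeksowanie od 0
--
--         # Dodaj czas przezbrojenia
--         if i > 0:
--             prev_job = sequence[i-1] - 1
--             current_time += S[prev_job][job]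
--
--         # Wykonaj zadanie
--         current_time += p[job]
--
--         # Sprawdź opóźnienie
--         if current_time > d[job]:
--             tardy_count += 1
--
--     return tardy_count
-- ===== SOURCE B (Python) =====
-- def calculate_tardy_jobs(sequence, p, d, S):
--     """
--     Liczy spoznione zadania bez stanu biezacego czasu: czas zakonczenia
--     kazdej pozycji jest wyliczany od zera jako suma czasow pracy i
--     przezbrojen na jej prefiksie (wzor zamkniety, bez akumulatora).
--     """
--     def completion_time(i):
--         prefix = sequence[:i + 1]
--         work = sum(p[j - 1] for j in prefix)
--         setups = sum(S[a - 1][b - 1] for a, b in zip(prefix, prefix[1:]))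
--         return work + setups
--     return sum(1 for i, job in enumerate(sequence) if completion_time(i) > d[job - 1])
-- ===== Notes on version B (the rewrite author's own statement) =====
-- stated objective: alternative
-- what changed: Replaces A's stateful single pass carrying a running clock and a tardy counter with a stateless closed-form recomputation: each position's completion time is computed independently from scratch as the sum of processing times plus adjacent setup times over its prefix, and tardy positions are counted in one comprehension; this trades A's O(n) accumulator loop for an O(n^2) accumulator-free formulation.
import Mathlib
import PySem

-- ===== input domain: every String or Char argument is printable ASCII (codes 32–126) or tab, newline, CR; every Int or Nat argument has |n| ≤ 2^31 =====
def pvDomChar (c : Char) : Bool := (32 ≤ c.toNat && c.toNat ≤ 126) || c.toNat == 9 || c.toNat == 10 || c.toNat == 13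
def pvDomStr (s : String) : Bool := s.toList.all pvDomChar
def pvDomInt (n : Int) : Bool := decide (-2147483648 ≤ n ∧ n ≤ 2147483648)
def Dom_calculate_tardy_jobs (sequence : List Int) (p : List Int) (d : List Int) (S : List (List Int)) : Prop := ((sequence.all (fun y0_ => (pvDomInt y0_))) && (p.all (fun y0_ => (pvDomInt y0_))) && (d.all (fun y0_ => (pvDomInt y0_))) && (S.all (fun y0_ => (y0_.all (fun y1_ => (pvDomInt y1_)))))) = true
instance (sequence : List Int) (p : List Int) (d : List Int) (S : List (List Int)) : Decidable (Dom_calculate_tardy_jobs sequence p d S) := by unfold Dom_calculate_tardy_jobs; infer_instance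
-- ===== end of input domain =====

-- B drops A's running clock: each completion time is recomputed from scratch as a prefix sum
-- formula (O(n^2), accumulator-free) instead of being carried through A's single O(n) loop.
-- Return values only; neither program mutates its arguments.

-- ===== PORT A =====
-- loop body of A's `for i in range(n)`, state = (current_time, tardy_count)
def pvStepA (p d : List Int) (S : List (List Int)) (sequence : List Int)
    (st : Int × Int) (i : Nat) : Int × Int :=
  let job := (PySem.List.pyGet? sequence (i : Int)).getD 0 - 1
  let ct := if i > 0 then
      let prev_job := (PySem.List.pyGet? sequence ((i : Int) - 1)).getD 0 - 1
      st.1 + (PySem.List.pyGet? ((PySem.List.pyGet? S prev_job).getD []) job).getD 0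
    else st.1
  let ct2 := ct + (PySem.List.pyGet? p job).getD 0
  if ct2 > (PySem.List.pyGet? d job).getD 0 then (ct2, st.2 + 1) else (ct2, st.2)

def calculate_tardy_jobs (sequence : List Int) (p : List Int) (d : List Int) (S : List (List Int)) : Int :=
  let n := sequence.length
  ((List.range n).foldl (pvStepA p d S sequence) (0, 0)).2

-- ===== PORT B =====
-- completion_time(i) of Source B: sum of processing times plus adjacent setup times on sequence[:i+1]
def pvCompletionTime (sequence p : List Int) (S : List (List Int)) (i : Int) : Int :=
  let pre := PySem.List.slice sequence none (some (i + 1))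
  let work := (pre.map (fun j => (PySem.List.pyGet? p (j - 1)).getD 0)).sum
  let setups := ((List.zip pre (PySem.List.slice pre (some 1) none)).map (fun ab =>
      (PySem.List.pyGet? ((PySem.List.pyGet? S (ab.1 - 1)).getD []) (ab.2 - 1)).getD 0)).sum
  work + setups

def calculate_tardy_jobs_alt (sequence : List Int) (p : List Int) (d : List Int) (S : List (List Int)) : Int :=
  (((PySem.List.enumerate sequence 0).countP (fun ij =>
      decide (pvCompletionTime sequence p S ij.1 > (PySem.List.pyGet? d (ij.2 - 1)).getD 0))) : Nat)

-- ===== PRECONDITION & SPEC =====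
-- Pre_ excludes exactly the inputs on which Python A raises IndexError (a job index or a
-- setup-matrix index out of range); both programs wrap negative in-range indices alike.
def Pre_calculate_tardy_jobs (sequence : List Int) (p : List Int) (d : List Int) (S : List (List Int)) : Prop :=
  (∀ j ∈ sequence, PySem.Raise.InRange p.length (j - 1) ∧ PySem.Raise.InRange d.length (j - 1)) ∧
  (∀ ab ∈ List.zip sequence sequence.tail,
      PySem.Raise.InRange S.length (ab.1 - 1) ∧
      PySem.Raise.InRange ((PySem.List.pyGet? S (ab.1 - 1)).getD []).length (ab.2 - 1))
instance (sequence : List Int) (p : List Int) (d : List Int) (S : List (List Int)) : Decidable (Pre_calculate_tardy_jobs sequence p d S) := by unfold Pre_calculate_tardy_jobs; infer_instance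

def pvWitness_calculate_tardy_jobs : List Int × List Int × List Int × List (List Int) :=
  ([1, 2, 1], [2, 3], [1, 9], [[0, 1], [1, 0]])

def Spec_calculate_tardy_jobs (sequence : List Int) (p : List Int) (d : List Int) (S : List (List Int)) (out : Int) : Prop := out = calculate_tardy_jobs_alt sequence p d S
instance (sequence : List Int) (p : List Int) (d : List Int) (S : List (List Int)) (out : Int) : Decidable (Spec_calculate_tardy_jobs sequence p d S out) := by unfold Spec_calculate_tardy_jobs; infer_instance

-- ===== CLAIM (what is proved, stated in full; the proofs are below) =====
def Claim_equal_calculate_tardy_jobs : Prop := ∀ (sequence : List Int) (p : List Int) (d : List Int) (S : List (List Int)), Dom_calculate_tardy_jobs sequence p d S → Pre_calculate_tardy_jobs sequence p d S → Spec_calculate_tardy_jobs sequence p d S (calculate_tardy_jobs sequence p d S)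

-- ===== LEMMAS AND PROOFS =====

-- common reference recursion: prev job (none for the first step), running time, remaining jobs
def pvGo (p d : List Int) (S : List (List Int)) : Option Int → Int → List Int → Nat
  | _, _, [] => 0
  | prev, t, j :: rest =>
    let setup : Int := match prev with
      | none => 0
      | some a => (PySem.List.pyGet? ((PySem.List.pyGet? S (a - 1)).getD []) (j - 1)).getD 0
    let ct := t + setup + (PySem.List.pyGet? p (j - 1)).getD 0
    (if ct > (PySem.List.pyGet? d (j - 1)).getD 0 then 1 else 0) + pvGo p d S (some j) ct rest

-- closed-form completion time of a prefix list
def pvC (p : List Int) (S : List (List Int)) (q : List Int) : Int :=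
  (q.map (fun j => (PySem.List.pyGet? p (j - 1)).getD 0)).sum
    + ((List.zip q q.tail).map (fun ab =>
        (PySem.List.pyGet? ((PySem.List.pyGet? S (ab.1 - 1)).getD []) (ab.2 - 1)).getD 0)).sum

lemma pvA_loop (p d : List Int) (S : List (List Int)) :
    ∀ (suf pre : List Int) (t c : Int),
    ((List.range' pre.length suf.length).foldl (pvStepA p d S (pre ++ suf)) (t, c)).2
      = c + (pvGo p d S pre.getLast? t suf : Int) := by
  intro suf
  induction suf with
  | nil => intro pre t c; simp [pvGo]
  | cons j rest ih =>
    intro pre t c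
    rw [List.length_cons, List.range'_succ, List.foldl_cons]
    rcases List.eq_nil_or_concat pre with h0 | ⟨pre', a, rfl⟩
    · subst h0
      simp only [List.nil_append, List.getLast?_nil]
      have hstep : pvStepA p d S (j :: rest) (t, c) (List.length ([] : List Int))
          = (if t + (PySem.List.pyGet? p (j - 1)).getD 0
                > (PySem.List.pyGet? d (j - 1)).getD 0
             then (t + (PySem.List.pyGet? p (j - 1)).getD 0, c + 1)
             else (t + (PySem.List.pyGet? p (j - 1)).getD 0, c)) := by
        simp [pvStepA]
      rw [hstep]
      simp only [pvGo, List.length_nil, zero_add, add_zero]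
      have hih1 := ih [j] (t + (PySem.List.pyGet? p (j - 1)).getD 0) (c + 1)
      have hih2 := ih [j] (t + (PySem.List.pyGet? p (j - 1)).getD 0) c
      simp only [List.length_cons, List.length_nil, zero_add,
        List.singleton_append, List.getLast?_singleton] at hih1 hih2
      split_ifs with h
      · rw [hih1]; push_cast; ring
      · rw [hih2]; push_cast; ring
    · simp only [List.concat_eq_append]
      have hj : PySem.List.pyGet? ((pre' ++ [a]) ++ j :: rest)
          (((pre' ++ [a]).length : Nat) : Int) = some j :=
        PySem.List.pyGet?_append_length (pre' ++ [a]) rest j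
      have hprev : PySem.List.pyGet? ((pre' ++ [a]) ++ j :: rest)
          ((((pre' ++ [a]).length : Nat) : Int) - 1) = some a := by
        have h1 : ((pre' ++ [a]) ++ j :: rest) = pre' ++ (a :: j :: rest) := by simp
        have h2 : ((((pre' ++ [a]).length : Nat) : Int) - 1) = ((pre'.length : Nat) : Int) := by
          simp [List.length_append]
        rw [h1, h2]
        exact PySem.List.pyGet?_append_length pre' (j :: rest) a
      have hpos : 0 < (pre' ++ [a]).length := by simp
      have hstep : pvStepA p d S ((pre' ++ [a]) ++ j :: rest) (t, c) (pre' ++ [a]).length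
          = (if t + (PySem.List.pyGet? ((PySem.List.pyGet? S (a - 1)).getD []) (j - 1)).getD 0
                  + (PySem.List.pyGet? p (j - 1)).getD 0
                > (PySem.List.pyGet? d (j - 1)).getD 0
             then (t + (PySem.List.pyGet? ((PySem.List.pyGet? S (a - 1)).getD []) (j - 1)).getD 0
                  + (PySem.List.pyGet? p (j - 1)).getD 0, c + 1)
             else (t + (PySem.List.pyGet? ((PySem.List.pyGet? S (a - 1)).getD []) (j - 1)).getD 0
                  + (PySem.List.pyGet? p (j - 1)).getD 0, c)) := by
        simp only [pvStepA, hj, hprev, Option.getD_some, gt_iff_lt, hpos, if_true]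
      rw [hstep]
      simp only [List.getLast?_concat, pvGo]
      have hih1 := ih ((pre' ++ [a]) ++ [j])
        (t + (PySem.List.pyGet? ((PySem.List.pyGet? S (a - 1)).getD []) (j - 1)).getD 0
           + (PySem.List.pyGet? p (j - 1)).getD 0) (c + 1)
      have hih2 := ih ((pre' ++ [a]) ++ [j])
        (t + (PySem.List.pyGet? ((PySem.List.pyGet? S (a - 1)).getD []) (j - 1)).getD 0
           + (PySem.List.pyGet? p (j - 1)).getD 0) c
      simp only [List.length_append, List.length_cons, List.length_nil, zero_add,
        List.append_assoc, List.cons_append, List.nil_append] at hih1 hih2 ⊢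
      have hlast : (pre' ++ [a, j]).getLast? = some j := by
        rw [show pre' ++ [a, j] = (pre' ++ [a]) ++ [j] by simp, List.getLast?_concat]
      rw [hlast] at hih1 hih2
      split_ifs with h
      · rw [hih1]; push_cast; ring
      · rw [hih2]; push_cast; ring

-- appending one job to a prefix adds its setup (from the last job) and its processing time
lemma pvC_concat (p : List Int) (S : List (List Int)) :
    ∀ (q : List Int) (j : Int),
    pvC p S (q ++ [j]) = pvC p S q
      + (match q.getLast? with
         | none => 0
         | some a => (PySem.List.pyGet? ((PySem.List.pyGet? S (a - 1)).getD []) (j - 1)).getD 0)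
      + (PySem.List.pyGet? p (j - 1)).getD 0 := by
  intro q
  induction q with
  | nil => intro j; simp [pvC]
  | cons a q' ih =>
    intro j
    cases q' with
    | nil => simp [pvC]; ring
    | cons b q'' =>
      have h := ih j
      simp only [pvC, List.cons_append, List.tail_cons, List.zip_cons_cons,
        List.map_cons, List.sum_cons, List.getLast?_cons_cons] at h ⊢
      omega

lemma pvCompletion_take (sequence p : List Int) (S : List (List Int)) (k : Nat) :
    pvCompletionTime sequence p S (k : Int) = pvC p S (sequence.take (k + 1)) := by
  have h1 : ((k : Int) + 1) = ((k + 1 : Nat) : Int) := by push_cast; ring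
  simp only [pvCompletionTime, h1, PySem.List.slice_to_natCast, PySem.List.slice_from_one, pvC]

lemma pvB_go (p d : List Int) (S : List (List Int)) :
    ∀ (rest pre : List Int),
    ((PySem.List.enumerate rest ((pre.length : Nat) : Int)).countP (fun ij =>
        decide (pvCompletionTime (pre ++ rest) p S ij.1
          > (PySem.List.pyGet? d (ij.2 - 1)).getD 0)))
      = pvGo p d S pre.getLast? (pvC p S pre) rest := by
  intro rest
  induction rest with
  | nil => intro pre; simp [PySem.List.enumerate_nil, pvGo]
  | cons j rest' ih =>
    intro pre
    rw [PySem.List.enumerate_cons, List.countP_cons]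
    have htake : (pre ++ j :: rest').take (pre.length + 1) = pre ++ [j] := by
      rw [show pre.length + 1 = pre.length + 1 from rfl]
      rw [List.take_append]
      simp
    have hhead : pvCompletionTime (pre ++ j :: rest') p S ((pre.length : Nat) : Int)
        = pvC p S (pre ++ [j]) := by
      rw [pvCompletion_take, htake]
    have hrec : ((pre.length : Nat) : Int) + 1 = (((pre ++ [j]).length : Nat) : Int) := by
      simp
    have hlist : pre ++ j :: rest' = (pre ++ [j]) ++ rest' := by simp
    have hih := ih (pre ++ [j])
    rw [List.getLast?_concat] at hih
    rw [hrec, hlist, hih]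
    simp only [pvGo, ← hlist, hhead, pvC_concat]
    cases hq : pre.getLast? <;> simp [gt_iff_lt] <;> split_ifs <;> omega

lemma pvA_eq_go (sequence p d : List Int) (S : List (List Int)) :
    calculate_tardy_jobs sequence p d S = (pvGo p d S none 0 sequence : Int) := by
  have h := pvA_loop p d S sequence [] 0 0
  simp only [List.length_nil, List.nil_append, List.getLast?_nil, zero_add] at h
  rw [← List.range_eq_range'] at h
  exact h

lemma pvB_eq_go (sequence p d : List Int) (S : List (List Int)) :
    calculate_tardy_jobs_alt sequence p d S = (pvGo p d S none 0 sequence : Int) := by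
  have h := pvB_go p d S sequence []
  simp only [List.length_nil, Nat.cast_zero, List.nil_append, List.getLast?_nil] at h
  have h0 : pvC p S [] = 0 := by simp [pvC]
  rw [h0] at h
  simp only [calculate_tardy_jobs_alt]
  exact congrArg Nat.cast h

-- ===== VERDICT (by name: the statement is the Claim_ definition above) =====
theorem calculate_tardy_jobs_spec : Claim_equal_calculate_tardy_jobs := by
  intro sequence p d S _ _
  unfold Spec_calculate_tardy_jobs
  rw [pvA_eq_go, pvB_eq_go]
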